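-- pv_equiv track=rewrite | github.com/ludia8888/User-Service | src/middleware/auth_dependencies.py | _match_permission
-- ===== SOURCE A (Python) =====
-- def _match_permission(user_perm: str, required_perm: str) -> bool:
--     """Match permission with wildcard support (resource:action:scope)"""
--     user_parts = user_perm.split(':')
--     required_parts = required_perm.split(':')
--
--     if len(user_parts) != len(required_parts):
--         return False
--
--     for user_part, required_part in zip(user_parts, required_parts):
--         if user_part != '*' and user_part != required_part:
--             return False
--
--     return True
-- ===== SOURCE B (Python) =====
-- def _match_permission(user_perm: str, required_perm: str) -> bool:
--     """Match permission with wildcard support (resource:action:scope).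
--
--     Segment-at-a-time via str.partition: no upfront split, compares the
--     head segments and advances to the remainders."""
--     while True:
--         u_head, u_sep, u_rest = user_perm.partition(':')
--         r_head, r_sep, r_rest = required_perm.partition(':')
--         if u_head != '*' and u_head != r_head:
--             return False
--         if not u_sep and not r_sep:
--             return True
--         if not (u_sep and r_sep):
--             return False
--         user_perm, required_perm = u_rest, r_rest
-- ===== Notes on version B (the rewrite author's own statement) =====
-- stated objective: alternative
-- what changed: Replaces split-both-strings-then-length-check-then-zip-loop with a segment-at-a-time recursion using str.partition that never materialises the segment lists.
import Mathlib
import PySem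

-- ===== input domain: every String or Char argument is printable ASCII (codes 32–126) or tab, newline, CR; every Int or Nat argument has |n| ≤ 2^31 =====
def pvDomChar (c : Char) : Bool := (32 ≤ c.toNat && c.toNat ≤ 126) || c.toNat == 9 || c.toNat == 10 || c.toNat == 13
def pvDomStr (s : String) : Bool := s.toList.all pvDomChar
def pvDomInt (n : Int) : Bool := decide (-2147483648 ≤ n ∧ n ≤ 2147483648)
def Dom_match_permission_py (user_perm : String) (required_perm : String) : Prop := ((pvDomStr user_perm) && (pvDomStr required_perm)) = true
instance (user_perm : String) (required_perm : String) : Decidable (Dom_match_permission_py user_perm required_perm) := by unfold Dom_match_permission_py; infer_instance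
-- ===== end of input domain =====

-- B replaces split-both-then-length-check-then-zip-loop with a segment-at-a-time
-- recursion via str.partition (alternative decomposition, same cost).

-- ===== PORT A =====
def match_permission_py (user_perm : String) (required_perm : String) : Bool :=
  -- user_parts = user_perm.split(':'); required_parts = required_perm.split(':')
  let user_parts := PySem.Chars.splitOn user_perm.toList [':']
  let required_parts := PySem.Chars.splitOn required_perm.toList [':']
  -- if len(user_parts) != len(required_parts): return False
  if user_parts.length ≠ required_parts.length then false
  else
    -- for user_part, required_part in zip(...): if user_part != '*' and user_part != required_part: return False
    (user_parts.zip required_parts).all (fun p => p.1 == ['*'] || p.1 == p.2)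

-- ===== PORT B =====
-- partition(':') = (takeWhile (≠':'), the ':' if present, rest); recursion on the rest
def matchSegs (u r : List Char) : Bool :=
  if u.takeWhile (· != ':') ≠ ['*'] ∧ u.takeWhile (· != ':') ≠ r.takeWhile (· != ':') then false
  else
    match hu : u.dropWhile (· != ':'), r.dropWhile (· != ':') with
    | [], [] => true                     -- not u_sep and not r_sep
    | _ :: u_rest, _ :: r_rest => matchSegs u_rest r_rest
    | _, _ => false
termination_by u.length
decreasing_by
  have h := List.length_dropWhile_le (· != ':') u
  rw [hu] at h
  simp at h
  omega

def match_permission_py_alt (user_perm : String) (required_perm : String) : Bool :=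
  matchSegs user_perm.toList required_perm.toList

-- ===== PRECONDITION & SPEC =====
def Spec_match_permission_py (user_perm : String) (required_perm : String) (out : Bool) : Prop := out = match_permission_py_alt user_perm required_perm
instance (user_perm : String) (required_perm : String) (out : Bool) : Decidable (Spec_match_permission_py user_perm required_perm out) := by unfold Spec_match_permission_py; infer_instance

-- ===== CLAIM (what is proved, stated in full; the proofs are below) =====
def Claim_equal_match_permission_py : Prop := ∀ (user_perm : String) (required_perm : String), Dom_match_permission_py user_perm required_perm → Spec_match_permission_py user_perm required_perm (match_permission_py user_perm required_perm)

-- ===== LEMMAS AND PROOFS =====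

-- segments of a char list, as B traverses them
def segs (u : List Char) : List (List Char) :=
  match hu : u.dropWhile (· != ':') with
  | [] => [u.takeWhile (· != ':')]
  | _ :: u_rest => u.takeWhile (· != ':') :: segs u_rest
termination_by u.length
decreasing_by
  have h := List.length_dropWhile_le (· != ':') u
  rw [hu] at h
  simp at h
  omega

-- A's check, phrased structurally on segment lists
def segMatch : List (List Char) → List (List Char) → Bool
  | [], [] => true
  | a :: as, b :: bs => (a == ['*'] || a == b) && segMatch as bs
  | _, _ => false

lemma segMatch_eq (up rp : List (List Char)) :
    (if up.length ≠ rp.length then false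
     else (up.zip rp).all (fun p => p.1 == ['*'] || p.1 == p.2)) = segMatch up rp := by
  induction up generalizing rp with
  | nil => cases rp <;> simp [segMatch]
  | cons a as ih =>
    cases rp with
    | nil => simp [segMatch]
    | cons b bs =>
      simp only [segMatch, ← ih bs]
      by_cases h : as.length = bs.length <;> simp [h, Bool.and_comm, List.all_cons]

lemma segMatch_nil_segs (u : List Char) : segMatch [] (segs u) = false := by
  rw [segs]; split <;> rfl

lemma segMatch_segs_nil (u : List Char) : segMatch (segs u) [] = false := by
  rw [segs]; split <;> rfl

lemma matchSegs_eq_segMatch (u r : List Char) :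
    matchSegs u r = segMatch (segs u) (segs r) := by
  fun_induction matchSegs u r <;>
    rw [segs, segs] <;> split <;> split <;>
    simp_all [segMatch, segMatch_nil_segs, segMatch_segs_nil] <;> tauto

-- splitOn by ':' computes exactly B's segments
lemma segs_head! (u : List Char) : (segs u).head! = u.takeWhile (· != ':') := by
  rw [segs]; split <;> rfl

lemma segs_head!_tail (u : List Char) : (segs u).head! :: (segs u).tail = segs u := by
  rw [segs]; split <;> rfl

lemma segs_cons_colon (rest : List Char) : segs (':' :: rest) = [] :: segs rest := by
  rw [segs]
  split <;> simp_all [List.takeWhile_cons]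

lemma segs_tail_cons (c : Char) (rest : List Char) (hc : c ≠ ':') :
    (segs (c :: rest)).tail = (segs rest).tail := by
  rw [segs, segs]
  have hd : List.dropWhile (fun x => x != ':') (c :: rest)
      = List.dropWhile (fun x => x != ':') rest := by
    simp [hc]
  split <;> split <;> simp_all

lemma splitOn_go_colon (fuel : Nat) (l cur : List Char) (acc : List (List Char))
    (h : l.length < fuel) :
    PySem.Chars.splitOn.go [':'] fuel l cur acc =
      acc.reverse ++ ((cur.reverse ++ (segs l).head!) :: (segs l).tail) := by
  induction fuel generalizing l cur acc with
  | zero => omega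
  | succ fuel ih =>
    cases l with
    | nil =>
      rw [PySem.Chars.splitOn.go, segs]
      simp
      omega
    | cons c rest =>
      rw [PySem.Chars.splitOn.go]
      by_cases hc : c = ':'
      · subst hc
        rw [if_pos (by simp [List.isPrefixOf])]
        have hdrop : List.drop [':'].length (':' :: rest) = rest := rfl
        rw [hdrop, ih rest [] _ (by simp at h; omega), segs_cons_colon]
        simp [segs_head!_tail]
      · rw [if_neg (by simp [List.isPrefixOf]; exact fun hh => hc hh.symm)]
        rw [ih rest (c :: cur) acc (by simp at h; omega)]
        rw [segs_tail_cons c rest hc, segs_head!, segs_head!,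
          List.takeWhile_cons, if_pos (by simp [hc])]
        simp

lemma splitOn_colon (u : List Char) : PySem.Chars.splitOn u [':'] = segs u := by
  rw [PySem.Chars.splitOn, splitOn_go_colon (u.length + 1) u [] [] (by omega)]
  simp [segs_head!_tail]

-- ===== VERDICT (by name: the statement is the Claim_ definition above) =====
theorem match_permission_py_spec : Claim_equal_match_permission_py := by
  intro u r _
  show match_permission_py u r = match_permission_py_alt u r
  rw [match_permission_py, match_permission_py_alt, matchSegs_eq_segMatch,
    splitOn_colon, splitOn_colon]
  exact segMatch_eq _ _
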